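-- pv_equiv track=rewrite | github.com/kyle-weng/CS-1-Coursework | midterm.py | board_sums
-- ===== SOURCE A (Python) =====
-- def board_sums(board):
--     '''
--     Takes a Life board and returns a new list of lists containing the neighbor
--     sums.
--     '''
--     def wrap_around(n, dimension_length):
--         if n < 0:
--             return n + dimension_length
--         elif n >= dimension_length:
--             return n - dimension_length
--         else:
--             return n
--     nrows = len(board)
--     ncols = len(board[0])
--     outer_list = []
--     for x in range (0, nrows, 1):
--         inner_list = []
--         for y in range (0, ncols, 1):
--             neighbor_indices = [(x - 1, y + 1), (x, y + 1), (x + 1, y + 1),\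
--                                 (x - 1, y), (x + 1, y),\
--                                 (x - 1, y - 1), (x, y - 1), (x + 1, y - 1)]
--             neighbor_sum = 0
--             for index_tuple in neighbor_indices:
--                 neighbor_sum += board[wrap_around(index_tuple[0], nrows)]\
--                 [wrap_around(index_tuple[1], ncols)]
--             inner_list.append(neighbor_sum)
--         outer_list.append(inner_list)
--     return outer_list
-- ===== SOURCE B (Python) =====
-- def board_sums(board):
--     '''
--     Takes a Life board and returns a new list of lists containing the neighbor
--     sums.  Direction-major: accumulate eight toroidally shifted copies of the
--     whole board instead of gathering the eight neighbors of each cell.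
--     '''
--     nrows = len(board)
--     ncols = len(board[0])
--     result = [[0 for _ in range(ncols)] for _ in range(nrows)]
--     for dx, dy in [(-1, 1), (0, 1), (1, 1), (-1, 0), (1, 0),
--                    (-1, -1), (0, -1), (1, -1)]:
--         result = [[result[x][y] + board[(x + dx) % nrows][(y + dy) % ncols]
--                    for y in range(ncols)]
--                   for x in range(nrows)]
--     return result
-- ===== Notes on version B (the rewrite author's own statement) =====
-- stated objective: alternative
-- what changed: Cell-major gathering of the 8 wrapped neighbors per cell is replaced by direction-major accumulation: for each of the 8 offsets a whole modularly-shifted copy of the board is added onto an all-zero grid.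
import Mathlib
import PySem

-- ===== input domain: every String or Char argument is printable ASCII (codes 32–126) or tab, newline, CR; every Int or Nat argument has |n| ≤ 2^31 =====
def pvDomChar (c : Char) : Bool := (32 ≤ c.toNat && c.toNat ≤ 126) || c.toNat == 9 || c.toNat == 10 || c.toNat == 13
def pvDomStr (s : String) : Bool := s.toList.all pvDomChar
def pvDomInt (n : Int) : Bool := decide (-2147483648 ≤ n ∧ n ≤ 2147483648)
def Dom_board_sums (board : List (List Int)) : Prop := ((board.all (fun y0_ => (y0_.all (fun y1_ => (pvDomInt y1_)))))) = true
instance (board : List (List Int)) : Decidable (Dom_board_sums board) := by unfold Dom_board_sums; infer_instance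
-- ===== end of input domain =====

-- B replaces A's cell-major gathering of 8 wrapped neighbors per cell by direction-major
-- accumulation of 8 modularly shifted whole-board copies onto a zero grid (objective: alternative).

-- ===== PORT A =====
-- wrap_around(n, dimension_length)
def pvWrap (n d : Int) : Int :=
  if n < 0 then n + d else if n ≥ d then n - d else n

def board_sums (board : List (List Int)) : List (List Int) :=
  let nrows : Int := board.length
  let ncols : Int := ((PySem.List.pyGetD board 0 []).length : Int)  -- board[0]; raises on [] — excluded by Pre_
  (PySem.List.pyRange 0 nrows 1).map (fun x =>
    (PySem.List.pyRange 0 ncols 1).map (fun y =>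
      let neighbor_indices : List (Int × Int) :=
        [(x - 1, y + 1), (x, y + 1), (x + 1, y + 1),
         (x - 1, y), (x + 1, y),
         (x - 1, y - 1), (x, y - 1), (x + 1, y - 1)]
      neighbor_indices.foldl (fun s t =>
        s + PySem.List.pyGetD (PySem.List.pyGetD board (pvWrap t.1 nrows) []) (pvWrap t.2 ncols) 0) 0))

-- ===== PORT B =====
def pvOffsets : List (Int × Int) :=
  [(-1, 1), (0, 1), (1, 1), (-1, 0), (1, 0), (-1, -1), (0, -1), (1, -1)]

-- one direction pass: result'[x][y] = result[x][y] + board[(x+dx) % nrows][(y+dy) % ncols]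
def pvStep (board : List (List Int)) (nrows ncols : Int)
    (res : List (List Int)) (d : Int × Int) : List (List Int) :=
  (PySem.List.pyRange 0 nrows 1).map (fun x =>
    (PySem.List.pyRange 0 ncols 1).map (fun y =>
      PySem.List.pyGetD (PySem.List.pyGetD res x []) y 0 +
        PySem.List.pyGetD (PySem.List.pyGetD board (PySem.Int.mod (x + d.1) nrows) [])
          (PySem.Int.mod (y + d.2) ncols) 0))

def board_sums_alt (board : List (List Int)) : List (List Int) :=
  let nrows : Int := board.length
  let ncols : Int := ((PySem.List.pyGetD board 0 []).length : Int)
  let result := (PySem.List.pyRange 0 nrows 1).map (fun _ =>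
    (PySem.List.pyRange 0 ncols 1).map (fun _ => (0 : Int)))
  pvOffsets.foldl (pvStep board nrows ncols) result

-- ===== PRECONDITION & SPEC =====
-- Pre_ excludes exactly the inputs where Python A raises IndexError: the empty board
-- (board[0]) and boards with a row shorter than the first row (neighbor column lookup).
def Pre_board_sums (board : List (List Int)) : Prop :=
  board ≠ [] ∧ ∀ row ∈ board, board.headI.length ≤ row.length
instance (board : List (List Int)) : Decidable (Pre_board_sums board) := by
  unfold Pre_board_sums; infer_instance

def pvWitness_board_sums : List (List Int) := [[1, 2], [3, 4]]

def Spec_board_sums (board : List (List Int)) (out : List (List Int)) : Prop := out = board_sums_alt board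
instance (board : List (List Int)) (out : List (List Int)) : Decidable (Spec_board_sums board out) := by unfold Spec_board_sums; infer_instance

-- ===== CLAIM (what is proved, stated in full; the proofs are below) =====
def Claim_equal_board_sums : Prop := ∀ (board : List (List Int)), Dom_board_sums board → Pre_board_sums board → Spec_board_sums board (board_sums board)

-- ===== LEMMAS AND PROOFS =====

-- Python's wrap_around equals Python's % on the arguments it is applied to.
theorem pvWrap_eq_mod (n m d : Int) (hnm : n = m) (hd : 0 < d) (hlo : -1 ≤ n) (hhi : n ≤ d) :
    pvWrap n d = PySem.Int.mod m d := by
  subst hnm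
  rw [PySem.Int.mod_eq_emod_of_pos hd]
  unfold pvWrap
  split_ifs with h1 h2
  · rw [← Int.add_emod_right]
    exact (Int.emod_eq_of_lt (by omega) (by omega)).symm
  · have hnd : n = d := le_antisymm hhi h2
    subst hnd
    simp
  · exact (Int.emod_eq_of_lt (by omega) (by omega)).symm

-- one direction pass applied to a grid given pointwise by f
theorem pvStep_grid (board : List (List Int)) (nrows ncols : Int)
    (f : Int → Int → Int) (d : Int × Int) :
    pvStep board nrows ncols
      ((PySem.List.pyRange 0 nrows 1).map (fun x =>
        (PySem.List.pyRange 0 ncols 1).map (fun y => f x y))) d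
    = (PySem.List.pyRange 0 nrows 1).map (fun x =>
        (PySem.List.pyRange 0 ncols 1).map (fun y =>
          f x y +
            PySem.List.pyGetD (PySem.List.pyGetD board (PySem.Int.mod (x + d.1) nrows) [])
              (PySem.Int.mod (y + d.2) ncols) 0)) := by
  unfold pvStep
  apply List.map_congr_left
  intro x hx
  obtain ⟨hx0, hxn⟩ := PySem.List.mem_pyRange_one.mp hx
  rw [PySem.List.pyGetD_map_pyRange_of_nonneg _ _ _ _ hx0 hxn]
  apply List.map_congr_left
  intro y hy
  obtain ⟨hy0, hyn⟩ := PySem.List.mem_pyRange_one.mp hy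
  rw [PySem.List.pyGetD_map_pyRange_of_nonneg _ _ _ _ hy0 hyn]

-- folding direction passes over a pointwise grid accumulates the per-cell sums
theorem pvFold_grid (board : List (List Int)) (nrows ncols : Int)
    (offs : List (Int × Int)) (f : Int → Int → Int) :
    offs.foldl (pvStep board nrows ncols)
      ((PySem.List.pyRange 0 nrows 1).map (fun x =>
        (PySem.List.pyRange 0 ncols 1).map (fun y => f x y)))
    = (PySem.List.pyRange 0 nrows 1).map (fun x =>
        (PySem.List.pyRange 0 ncols 1).map (fun y =>
          offs.foldl (fun s d =>
            s + PySem.List.pyGetD (PySem.List.pyGetD board (PySem.Int.mod (x + d.1) nrows) [])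
              (PySem.Int.mod (y + d.2) ncols) 0) (f x y))) := by
  induction offs generalizing f with
  | nil => simp [List.foldl]
  | cons d offs ih =>
    simp only [List.foldl_cons]
    rw [pvStep_grid, ih]

theorem board_sums_eq_alt (board : List (List Int)) :
    board_sums board = board_sums_alt board := by
  unfold board_sums board_sums_alt
  rw [pvFold_grid board (board.length) ((PySem.List.pyGetD board 0 []).length : Int) pvOffsets
    (fun _ _ => 0)]
  apply List.map_congr_left
  intro x hx
  obtain ⟨hx0, hxn⟩ := PySem.List.mem_pyRange_one.mp hx
  apply List.map_congr_left
  intro y hy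
  obtain ⟨hy0, hyn⟩ := PySem.List.mem_pyRange_one.mp hy
  have hlist :
      [(x - 1, y + 1), (x, y + 1), (x + 1, y + 1),
       (x - 1, y), (x + 1, y),
       (x - 1, y - 1), (x, y - 1), (x + 1, y - 1)]
      = pvOffsets.map (fun d : Int × Int => (x + d.1, y + d.2)) := by
    simp only [pvOffsets, List.map]
    norm_num
    omega
  rw [hlist, List.foldl_map]
  apply PySem.List.foldl_congr_mem
  intro s d hd
  have hd1 : -1 ≤ d.1 ∧ d.1 ≤ 1 ∧ -1 ≤ d.2 ∧ d.2 ≤ 1 := by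
    simp only [pvOffsets, List.mem_cons, List.not_mem_nil, or_false] at hd
    rcases hd with h | h | h | h | h | h | h | h <;> subst h <;> norm_num
  rw [pvWrap_eq_mod (x + d.1) (x + d.1) _ rfl (by omega) (by omega) (by omega),
      pvWrap_eq_mod (y + d.2) (y + d.2) _ rfl (by omega) (by omega) (by omega)]

-- ===== VERDICT (by name: the statement is the Claim_ definition above) =====
theorem board_sums_spec : Claim_equal_board_sums := by
  intro board _ _
  unfold Spec_board_sums
  exact board_sums_eq_alt board
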